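-- pv_equiv track=rewrite | github.com/Blank1001/GIFR | load_data.py | process_image_path_eval
-- ===== SOURCE A (Python) =====
-- def process_image_path_eval(text_list, image_list):
--     positive_path = []
--     negative_path = []
--     texts = []
--     for i in range(len(image_list)):
--         images = image_list[i]
--         for j in range(len(images)):
--             positive_path.append(images[j])
--             negative_path.append("inf.png")
--             texts.append(text_list[i])
--     positive_paths = []
--     negative_paths = []
--     for e in positive_path:
--         if e.startswith("twitter"):
--             result = "".join(["./dataset/twitter2017_images/", e.split('-')[1]])
--         else:
--             result = "".join(["./dataset/new_images/", e])
--         positive_paths.append(result)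
--     for e in negative_path:
--         if e.startswith("twitter"):
--             result = "".join(["./dataset/twitter2017_images/", e.split('-')[1]])
--         else:
--             result = "".join(["./dataset/new_images/", e])
--         negative_paths.append(result)
--     return positive_paths, negative_paths, texts
-- ===== SOURCE B (Python) =====
-- def process_image_path_eval(text_list, image_list):
--     # One fused pass; the negative name is always 'inf.png', so its path is a constant.
--     def to_path(name):
--         if name.startswith("twitter"):
--             return "./dataset/twitter2017_images/" + name.split('-')[1]
--         return "./dataset/new_images/" + name
--     positive_paths, negative_paths, texts = [], [], []
--     for i, images in enumerate(image_list):
--         for image in images: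
--             positive_paths.append(to_path(image))
--             negative_paths.append("./dataset/new_images/inf.png")
--             texts.append(text_list[i])
--     return positive_paths, negative_paths, texts
-- ===== Notes on version B (the rewrite author's own statement) =====
-- stated objective: simpler
-- what changed: Replaces A's flatten-into-three-lists pass followed by two separate transform loops with a single fused pass over enumerate(image_list) using a to_path helper, exploiting that the negative name is always 'inf.png' so its path is a constant.
import Mathlib
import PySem

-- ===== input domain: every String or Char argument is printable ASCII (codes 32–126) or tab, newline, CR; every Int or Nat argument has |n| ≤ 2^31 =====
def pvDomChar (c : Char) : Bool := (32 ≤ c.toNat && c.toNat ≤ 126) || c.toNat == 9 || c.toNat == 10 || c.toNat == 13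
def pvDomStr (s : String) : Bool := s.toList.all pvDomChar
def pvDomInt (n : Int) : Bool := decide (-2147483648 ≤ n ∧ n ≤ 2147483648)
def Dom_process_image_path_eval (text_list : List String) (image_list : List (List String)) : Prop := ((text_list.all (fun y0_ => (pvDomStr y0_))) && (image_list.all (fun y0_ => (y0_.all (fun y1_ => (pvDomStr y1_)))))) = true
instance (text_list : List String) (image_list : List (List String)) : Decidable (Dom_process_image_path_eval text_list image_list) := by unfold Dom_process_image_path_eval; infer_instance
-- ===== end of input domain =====

-- B fuses A's flatten pass and the two transform passes into one pass over enumerate(image_list),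
-- using that the negative name is always 'inf.png' (so its path is a constant); equal return value on Pre_.

-- ===== PORT A =====
def process_image_path_eval (text_list : List String) (image_list : List (List String)) : List String × List String × List String :=
  let st := (PySem.List.pyRange 0 (image_list.length : Int) 1).foldl
    (fun (acc : List String × List String × List String) i =>
      let images := PySem.List.pyGetD image_list i []
      (PySem.List.pyRange 0 (images.length : Int) 1).foldl
        (fun (acc : List String × List String × List String) j =>
          (acc.1 ++ [PySem.List.pyGetD images j ""],
           acc.2.1 ++ ["inf.png"],
           acc.2.2 ++ [PySem.List.pyGetD text_list i ""])) acc)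
    ([], [], [])
  let positive_path := st.1
  let negative_path := st.2.1
  let texts := st.2.2
  let positive_paths := positive_path.foldl (fun (acc : List String) e =>
    if PySem.Str.startswith e "twitter" then
      acc ++ [PySem.Str.join "" ["./dataset/twitter2017_images/", PySem.List.pyGetD ((PySem.Str.split? e "-").getD []) 1 ""]]
    else
      acc ++ [PySem.Str.join "" ["./dataset/new_images/", e]]) []
  let negative_paths := negative_path.foldl (fun (acc : List String) e =>
    if PySem.Str.startswith e "twitter" then
      acc ++ [PySem.Str.join "" ["./dataset/twitter2017_images/", PySem.List.pyGetD ((PySem.Str.split? e "-").getD []) 1 ""]]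
    else
      acc ++ [PySem.Str.join "" ["./dataset/new_images/", e]]) []
  (positive_paths, negative_paths, texts)

-- ===== PORT B =====
def to_path (name : String) : String :=
  if PySem.Str.startswith name "twitter" then
    "./dataset/twitter2017_images/" ++ PySem.List.pyGetD ((PySem.Str.split? name "-").getD []) 1 ""
  else
    "./dataset/new_images/" ++ name

def process_image_path_eval_alt (text_list : List String) (image_list : List (List String)) : List String × List String × List String :=
  (PySem.List.enumerate image_list).foldl
    (fun (acc : List String × List String × List String) p =>
      p.2.foldl
        (fun (acc : List String × List String × List String) image =>
          (acc.1 ++ [to_path image],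
           acc.2.1 ++ ["./dataset/new_images/inf.png"],
           acc.2.2 ++ [PySem.List.pyGetD text_list p.1 ""])) acc)
    ([], [], [])

-- ===== PRECONDITION & SPEC =====
-- Pre_ excludes exactly the inputs where the Python raises IndexError: a nonempty image group at an
-- index with no matching text, or a name starting with 'twitter' that contains no '-' (split()[1] fails).
def Pre_process_image_path_eval (text_list : List String) (image_list : List (List String)) : Prop :=
  (∀ p ∈ PySem.List.enumerate image_list, p.2 ≠ [] → p.1 < (text_list.length : Int)) ∧
  (∀ g ∈ image_list, ∀ name ∈ g, PySem.Str.startswith name "twitter" = true → 2 ≤ ((PySem.Str.split? name "-").getD []).length)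
instance (text_list : List String) (image_list : List (List String)) : Decidable (Pre_process_image_path_eval text_list image_list) := by unfold Pre_process_image_path_eval; infer_instance

def pvWitness_process_image_path_eval : List String × List (List String) := (["t1", "t2"], [["a.png", "twitter-x.jpg"], ["b.png"]])

def Spec_process_image_path_eval (text_list : List String) (image_list : List (List String)) (out : List String × List String × List String) : Prop := out = process_image_path_eval_alt text_list image_list
instance (text_list : List String) (image_list : List (List String)) (out : List String × List String × List String) : Decidable (Spec_process_image_path_eval text_list image_list out) := by unfold Spec_process_image_path_eval; infer_instance

-- ===== CLAIM (what is proved, stated in full; the proofs are below) =====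
def Claim_equal_process_image_path_eval : Prop := ∀ (text_list : List String) (image_list : List (List String)), Dom_process_image_path_eval text_list image_list → Pre_process_image_path_eval text_list image_list → Spec_process_image_path_eval text_list image_list (process_image_path_eval text_list image_list)

-- ===== LEMMAS AND PROOFS =====

-- "".join([a, b]) is string concatenation
theorem join_two (a b : String) : PySem.Str.join "" [a, b] = a ++ b := by
  simp [PySem.Str.join, PySem.Chars.join, List.intercalate]

-- A's transform (with "".join) is B's to_path
theorem transformA_eq_to_path :
    (fun e => if PySem.Str.startswith e "twitter" then
        PySem.Str.join "" ["./dataset/twitter2017_images/", PySem.List.pyGetD ((PySem.Str.split? e "-").getD []) 1 ""]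
      else PySem.Str.join "" ["./dataset/new_images/", e]) = to_path := by
  funext e
  unfold to_path
  split <;> rw [join_two]

-- one group: a triple-append fold splits componentwise into maps
theorem triple_fold {α : Type} (g : List α) (f1 f2 f3 : α → String)
    (acc : List String × List String × List String) :
    g.foldl (fun acc x => (acc.1 ++ [f1 x], acc.2.1 ++ [f2 x], acc.2.2 ++ [f3 x])) acc
      = (acc.1 ++ g.map f1, acc.2.1 ++ g.map f2, acc.2.2 ++ g.map f3) := by
  induction g generalizing acc with
  | nil => simp
  | cons x xs ih => simp [List.foldl_cons, ih]

-- the fused pass over enumerate, closed form (covers both ports' loop shape)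
theorem fused_fold (tl : List String) (gs : List (List String)) (s : Int) (f : String → String)
    (c : String) (acc : List String × List String × List String) :
    (PySem.List.enumerate gs s).foldl
      (fun acc p => p.2.foldl
        (fun (acc : List String × List String × List String) x =>
          (acc.1 ++ [f x], acc.2.1 ++ [c], acc.2.2 ++ [PySem.List.pyGetD tl p.1 ""])) acc) acc
    = (acc.1 ++ (PySem.List.enumerate gs s).flatMap (fun p => p.2.map f),
       acc.2.1 ++ gs.flatMap (fun g => g.map (fun _ => c)),
       acc.2.2 ++ (PySem.List.enumerate gs s).flatMap (fun p => p.2.map (fun _ => PySem.List.pyGetD tl p.1 ""))) := by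
  induction gs generalizing s acc with
  | nil => simp [PySem.List.enumerate_nil]
  | cons g gs ih =>
    rw [PySem.List.enumerate_cons, List.foldl_cons, triple_fold, ih]
    simp [List.flatMap_cons]

-- A's phase 1 (index loops) equals the fused pass with f = id, c = "inf.png"
theorem a_phase1 (tl : List String) (gs : List (List String)) :
    (PySem.List.pyRange 0 (gs.length : Int) 1).foldl
      (fun (acc : List String × List String × List String) i =>
        let images := PySem.List.pyGetD gs i []
        (PySem.List.pyRange 0 (images.length : Int) 1).foldl
          (fun (acc : List String × List String × List String) j =>
            (acc.1 ++ [PySem.List.pyGetD images j ""],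
             acc.2.1 ++ ["inf.png"],
             acc.2.2 ++ [PySem.List.pyGetD tl i ""])) acc) (([], [], []) : List String × List String × List String)
    = ((PySem.List.enumerate gs 0).flatMap (fun p => p.2),
       gs.flatMap (fun g => g.map (fun _ => "inf.png")),
       (PySem.List.enumerate gs 0).flatMap (fun p => p.2.map (fun _ => PySem.List.pyGetD tl p.1 ""))) := by
  have h1 : ∀ (i : Int) (acc : List String × List String × List String),
      (PySem.List.pyRange 0 ((PySem.List.pyGetD gs i []).length : Int) 1).foldl
        (fun (acc : List String × List String × List String) j =>
          ((acc.1 ++ [PySem.List.pyGetD (PySem.List.pyGetD gs i []) j ""],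
            acc.2.1 ++ ["inf.png"],
            acc.2.2 ++ [PySem.List.pyGetD tl i ""]) : List String × List String × List String)) acc
      = (PySem.List.pyGetD gs i []).foldl
          (fun (acc : List String × List String × List String) x =>
            (acc.1 ++ [x], acc.2.1 ++ ["inf.png"], acc.2.2 ++ [PySem.List.pyGetD tl i ""])) acc := by
    intro i acc
    exact PySem.List.foldl_pyRange_zero_pyGetD' (PySem.List.pyGetD gs i []) ""
      (fun acc x => (acc.1 ++ [x], acc.2.1 ++ ["inf.png"], acc.2.2 ++ [PySem.List.pyGetD tl i ""])) acc
  simp only [h1]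
  have h2 := PySem.List.enumerate_eq_map_pyRange (xs := gs) (d := [])
  have h3 : (PySem.List.pyRange 0 (gs.length : Int) 1).foldl
      (fun (acc : List String × List String × List String) i =>
        (PySem.List.pyGetD gs i []).foldl
          (fun (acc : List String × List String × List String) x =>
            (acc.1 ++ [x], acc.2.1 ++ ["inf.png"], acc.2.2 ++ [PySem.List.pyGetD tl i ""])) acc)
      (([], [], []) : List String × List String × List String)
      = (PySem.List.enumerate gs 0).foldl
          (fun (acc : List String × List String × List String) p =>
            p.2.foldl
              (fun (acc : List String × List String × List String) x =>
                (acc.1 ++ [x], acc.2.1 ++ ["inf.png"], acc.2.2 ++ [PySem.List.pyGetD tl p.1 ""])) acc)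
          (([], [], []) : List String × List String × List String) := by
    rw [h2, List.foldl_map]
    simp [PySem.List.len_eq]
  rw [h3, fused_fold]
  simp
-- the transform loop is a map
theorem transform_fold (l : List String) :
    l.foldl (fun (acc : List String) e =>
      if PySem.Str.startswith e "twitter" then
        acc ++ [PySem.Str.join "" ["./dataset/twitter2017_images/", PySem.List.pyGetD ((PySem.Str.split? e "-").getD []) 1 ""]]
      else acc ++ [PySem.Str.join "" ["./dataset/new_images/", e]]) []
    = l.map to_path := by
  have h : (fun (acc : List String) e =>
      if PySem.Str.startswith e "twitter" then
        acc ++ [PySem.Str.join "" ["./dataset/twitter2017_images/", PySem.List.pyGetD ((PySem.Str.split? e "-").getD []) 1 ""]]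
      else acc ++ [PySem.Str.join "" ["./dataset/new_images/", e]])
      = (fun (acc : List String) e => acc ++ [to_path e]) := by
    funext acc e
    rw [← transformA_eq_to_path]
    simp only []
    split <;> simp [*]
  rw [h, PySem.List.foldl_append_singleton_eq_map]
  simp

theorem to_path_inf : to_path "inf.png" = "./dataset/new_images/inf.png" := by decide

-- ===== VERDICT (by name: the statement is the Claim_ definition above) =====
theorem process_image_path_eval_spec : Claim_equal_process_image_path_eval := by
  intro text_list image_list _ _
  show process_image_path_eval text_list image_list = process_image_path_eval_alt text_list image_list
  unfold process_image_path_eval process_image_path_eval_alt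
  rw [a_phase1]
  simp only [transform_fold]
  rw [fused_fold]
  simp only [List.nil_append]
  refine Prod.ext ?_ (Prod.ext ?_ rfl)
  · simp [List.map_flatMap]
  · simp [List.map_flatMap, to_path_inf]
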